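-- pv_equiv track=rewrite | github.com/Data-to-Insight-Center/cyberinfrastructure-knowledge-network | plugins/power_monitoring/device/device_request_generator.py | split_data_by_timestamp
-- ===== SOURCE A (Python) =====
-- def split_data_by_timestamp(data):
--     timestamp = data[0][-1]
--     split_data = []
--     single_split = []
--     for row in data:
--         if row[-1] == timestamp:
--             single_split.append(row)
--         else:
--             split_data.append(single_split)
--             single_split = [row]
--             timestamp = row[-1]
--     split_data.append(single_split)
--     return split_data
-- ===== SOURCE B (Python) =====
-- def split_data_by_timestamp(data):
--     groups = []
--     rest = data
--     while rest:
--         t = rest[0][-1]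
--         k = 1
--         while k < len(rest) and rest[k][-1] == t:
--             k += 1
--         groups.append(rest[:k])
--         rest = rest[k:]
--     return groups
-- ===== Notes on version B (the rewrite author's own statement) =====
-- stated objective: alternative
-- what changed: A threads mutable state (current timestamp, pending group, accumulated result) through one pass over the rows; B instead repeatedly takes the maximal leading span of rows sharing the first row's timestamp and recurses on the remainder, carrying no cross-group state.
import Mathlib
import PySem

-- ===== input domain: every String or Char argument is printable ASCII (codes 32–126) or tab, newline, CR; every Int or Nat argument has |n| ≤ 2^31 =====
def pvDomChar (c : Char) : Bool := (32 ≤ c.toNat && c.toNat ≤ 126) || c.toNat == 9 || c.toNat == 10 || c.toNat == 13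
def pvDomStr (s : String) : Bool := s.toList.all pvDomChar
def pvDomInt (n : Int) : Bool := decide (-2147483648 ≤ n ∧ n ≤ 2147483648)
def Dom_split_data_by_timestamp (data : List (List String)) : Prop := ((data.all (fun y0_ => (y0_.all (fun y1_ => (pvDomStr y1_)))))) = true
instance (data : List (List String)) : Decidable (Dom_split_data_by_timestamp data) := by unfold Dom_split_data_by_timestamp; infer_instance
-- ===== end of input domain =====

-- B restructures A's single stateful pass (current timestamp + pending group + result) into
-- repeated extraction of the maximal leading run of rows sharing the first row's timestamp: alternative decomposition, same cost.

-- ===== PORT A =====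
-- row[-1]; Pre_ excludes empty rows (and empty data), where Python raises IndexError
def pvLast (row : List String) : String := (PySem.List.pyGet? row (-1)).getD ""

-- A's for-loop over the rows, carrying exactly its state (timestamp, split_data, single_split)
def pvALoop (rows : List (List String)) (timestamp : String) (split_data : List (List (List String)))
    (single_split : List (List String)) : List (List (List String)) :=
  match rows with
  | [] => split_data ++ [single_split]
  | row :: rest =>
    if pvLast row == timestamp then
      pvALoop rest timestamp split_data (single_split ++ [row])
    else
      pvALoop rest (pvLast row) (split_data ++ [single_split]) [row]

def split_data_by_timestamp (data : List (List String)) : List (List (List String)) :=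
  let timestamp := pvLast ((PySem.List.pyGet? data 0).getD [])   -- data[0][-1]; Pre_ excludes data = []
  pvALoop data timestamp [] []

-- ===== PORT B =====
-- B's outer while loop: rest[:k] is rest[0] followed by the rows the inner while accepted
-- (the maximal leading run of rest[1:] with rest[k][-1] == t, i.e. takeWhile), and rest[k:] is the dropWhile remainder.
-- fuel = rest.length bounds the outer while loop (each pass removes at least one row); it only makes the recursion structural
def pvBLoopF (fuel : Nat) (rest : List (List String)) : List (List (List String)) :=
  match fuel, rest with
  | _, [] => []
  | 0, _ => []
  | fuel + 1, row :: tl =>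
    (row :: tl.takeWhile (fun r => pvLast r == pvLast row))
      :: pvBLoopF fuel (tl.dropWhile (fun r => pvLast r == pvLast row))

def pvBLoop (rest : List (List String)) : List (List (List String)) :=
  pvBLoopF rest.length rest

def split_data_by_timestamp_alt (data : List (List String)) : List (List (List String)) :=
  pvBLoop data

-- ===== PRECONDITION & SPEC =====
-- Pre_ excludes exactly the inputs where Python A raises IndexError: empty data (data[0]) and any empty row (row[-1]).
def Pre_split_data_by_timestamp (data : List (List String)) : Prop :=
  (!data.isEmpty && data.all (fun row => !row.isEmpty)) = true
instance (data : List (List String)) : Decidable (Pre_split_data_by_timestamp data) := by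
  unfold Pre_split_data_by_timestamp; infer_instance

def pvWitness_split_data_by_timestamp : List (List String) :=
  [["a", "1"], ["b", "1"], ["c", "2"]]

def Spec_split_data_by_timestamp (data : List (List String)) (out : List (List (List String))) : Prop := out = split_data_by_timestamp_alt data
instance (data : List (List String)) (out : List (List (List String))) : Decidable (Spec_split_data_by_timestamp data out) := by unfold Spec_split_data_by_timestamp; infer_instance

-- ===== CLAIM (what is proved, stated in full; the proofs are below) =====
def Claim_equal_split_data_by_timestamp : Prop := ∀ (data : List (List String)), Dom_split_data_by_timestamp data → Pre_split_data_by_timestamp data → Spec_split_data_by_timestamp data (split_data_by_timestamp data)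

-- ===== LEMMAS AND PROOFS =====

-- the fuel argument of pvBLoopF is irrelevant as long as it covers the list
theorem pvBLoopF_fuel (f : Nat) : ∀ (g : Nat) (rest : List (List String)),
    rest.length ≤ f → rest.length ≤ g → pvBLoopF f rest = pvBLoopF g rest := by
  induction f with
  | zero =>
    intro g rest hf _
    cases rest with
    | nil => cases g <;> rfl
    | cons row tl => simp at hf
  | succ f ih =>
    intro g rest hf hg
    cases rest with
    | nil => cases g <;> rfl
    | cons row tl =>
      cases g with
      | zero => simp at hg
      | succ g =>
        simp only [pvBLoopF]
        congr 1
        exact ih g _ (le_trans (List.length_dropWhile_le _ _) (Nat.lt_succ_iff.mp hf))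
          (le_trans (List.length_dropWhile_le _ _) (Nat.lt_succ_iff.mp hg))

theorem pvBLoop_nil : pvBLoop [] = [] := rfl

theorem pvBLoop_cons (row : List String) (tl : List (List String)) :
    pvBLoop (row :: tl) =
      (row :: tl.takeWhile (fun r => pvLast r == pvLast row))
        :: pvBLoop (tl.dropWhile (fun r => pvLast r == pvLast row)) := by
  simp only [pvBLoop, List.length_cons, pvBLoopF]
  congr 1
  exact pvBLoopF_fuel tl.length _ _ (List.length_dropWhile_le _ _) le_rfl

-- A's loop, run from any state, emits the finished groups, then the pending group extended by
-- the leading run matching the current timestamp, then B's groups of the remainder.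
theorem pvALoop_eq (rows : List (List String)) : ∀ (t : String)
    (acc : List (List (List String))) (cur : List (List String)),
    pvALoop rows t acc cur =
      acc ++ [cur ++ rows.takeWhile (fun r => pvLast r == t)]
        ++ pvBLoop (rows.dropWhile (fun r => pvLast r == t)) := by
  induction rows with
  | nil => intro t acc cur; simp [pvALoop, pvBLoop_nil]
  | cons row rest ih =>
    intro t acc cur
    by_cases h : pvLast row == t
    · simp [pvALoop, h, ih]
    · simp only [pvALoop, h, if_neg, Bool.false_eq_true, not_false_eq_true]
      rw [ih]
      simp only [List.takeWhile_cons, List.dropWhile_cons, h, if_false, Bool.false_eq_true,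
        reduceIte]
      rw [pvBLoop_cons]
      simp

theorem split_data_by_timestamp_spec : Claim_equal_split_data_by_timestamp := by
  intro data _ hpre
  unfold Spec_split_data_by_timestamp split_data_by_timestamp split_data_by_timestamp_alt
  cases data with
  | nil => simp [Pre_split_data_by_timestamp] at hpre
  | cons d0 rest =>
    simp only [PySem.List.pyGet?, PySem.List.pyIdx?]
    simp only [pvALoop, pvALoop_eq]
    rw [pvBLoop_cons]
    simp
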